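-- pv_equiv track=rewrite | github.com/pypi-data/pypi-mirror-395 | packages/agentic-fleet/agentic_fleet-0.6.9-py3-none-any.whl/agentic_fleet/workflows/helpers.py | prepare_subtasks
-- ===== SOURCE A (Python) =====
-- def prepare_subtasks(
--     agents: list[str], subtasks: list[str] | None, fallback_task: str
-- ) -> list[str]:
--     """Normalize DSPy-provided subtasks to align with assigned agents.
--
--     Ensures the number of subtasks matches the number of agents by
--     either padding with the fallback task or truncating excess subtasks.
--
--     Args:
--         agents: List of agent names assigned to the task.
--         subtasks: Optional list of subtasks from DSPy routing.
--         fallback_task: Task to use when subtasks are missing or insufficient.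
--
--     Returns:
--         List of subtasks with length equal to number of agents.
--     """
--     if not agents:
--         return []
--
--     normalized: list[str]
--     if not subtasks:
--         normalized = [fallback_task for _ in agents]
--     else:
--         normalized = [str(task) for task in subtasks]
--
--     if len(normalized) < len(agents):
--         normalized.extend([fallback_task] * (len(agents) - len(normalized)))
--     elif len(normalized) > len(agents):
--         normalized = normalized[: len(agents)]
--
--     return normalized
-- ===== SOURCE B (Python) =====
-- _MISSING = object()
--
-- def prepare_subtasks(agents, subtasks, fallback_task):
--     it = iter(subtasks or [])
--     out = []
--     for _ in agents:
--         t = next(it, _MISSING)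
--         out.append(fallback_task if t is _MISSING else str(t))
--     return out
-- ===== Notes on version B (the rewrite author's own statement) =====
-- stated objective: alternative
-- what changed: Replaces A's build-full-list-then-pad-or-truncate staging (length comparisons, extend, slice) with a single lockstep pass driven by an iterator over the subtasks: one agent per step consumes the next subtask if the iterator yields one, else the fallback; no lengths, no slicing, no oversized intermediate list.
import Mathlib
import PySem

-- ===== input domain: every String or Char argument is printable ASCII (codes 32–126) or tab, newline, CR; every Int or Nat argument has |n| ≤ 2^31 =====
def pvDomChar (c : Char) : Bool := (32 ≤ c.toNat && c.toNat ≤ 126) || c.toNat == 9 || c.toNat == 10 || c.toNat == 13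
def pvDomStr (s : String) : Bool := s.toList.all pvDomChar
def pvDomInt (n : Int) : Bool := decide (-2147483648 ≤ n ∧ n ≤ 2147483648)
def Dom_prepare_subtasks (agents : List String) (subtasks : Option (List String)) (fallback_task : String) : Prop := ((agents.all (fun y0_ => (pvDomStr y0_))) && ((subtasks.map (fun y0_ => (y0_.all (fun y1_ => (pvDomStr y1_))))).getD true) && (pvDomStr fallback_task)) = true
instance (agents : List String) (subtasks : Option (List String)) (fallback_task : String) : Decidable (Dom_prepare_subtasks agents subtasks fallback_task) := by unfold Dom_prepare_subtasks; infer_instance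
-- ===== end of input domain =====

-- B replaces A's build-then-pad-or-truncate staging with one lockstep recursion over agents and subtasks; objective: alternative.

-- ===== PORT A =====
-- literal transliteration of A: early return on empty agents, build 'normalized',
-- then pad with replicate or truncate with the slice normalized[:len(agents)]
def prepare_subtasks (agents : List String) (subtasks : Option (List String)) (fallback_task : String) : List String :=
  if agents = [] then []
  else
    let normalized : List String :=
      -- 'if not subtasks': None or empty list
      if subtasks.getD [] = [] then agents.map (fun _ => fallback_task)
      else (subtasks.getD []).map (fun task => task)   -- str(task) is identity on str
    if normalized.length < agents.length then
      normalized ++ List.replicate (agents.length - normalized.length) fallback_task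
    else if normalized.length > agents.length then
      PySem.List.slice normalized none (some (agents.length : Int))
    else normalized

-- ===== PORT B =====
-- literal transliteration of B: it = iter(subtasks or []); for _ in agents consume next(it) or fallback.
-- The iterator is the suffix of src not yet consumed; the loop is a foldl over agents
-- carrying (remaining iterator, out). str(t) is identity on str.
def prepare_subtasks_alt (agents : List String) (subtasks : Option (List String)) (fallback_task : String) : List String :=
  let src := subtasks.getD []
  (agents.foldl (fun (st : List String × List String) _ =>
      match st.1 with
      | [] => ([], st.2 ++ [fallback_task])          -- next(it, _MISSING) returned _MISSING
      | t :: rest => (rest, st.2 ++ [t]))            -- next(it) yielded t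
    (src, [])).2

-- ===== PRECONDITION & SPEC =====
def Spec_prepare_subtasks (agents : List String) (subtasks : Option (List String)) (fallback_task : String) (out : List String) : Prop := out = prepare_subtasks_alt agents subtasks fallback_task
instance (agents : List String) (subtasks : Option (List String)) (fallback_task : String) (out : List String) : Decidable (Spec_prepare_subtasks agents subtasks fallback_task out) := by unfold Spec_prepare_subtasks; infer_instance

-- ===== CLAIM (what is proved, stated in full; the proofs are below) =====
def Claim_equal_prepare_subtasks : Prop := ∀ (agents : List String) (subtasks : Option (List String)) (fallback_task : String), Dom_prepare_subtasks agents subtasks fallback_task → Spec_prepare_subtasks agents subtasks fallback_task (prepare_subtasks agents subtasks fallback_task)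

-- ===== LEMMAS AND PROOFS =====

-- closed form of B's lockstep fold: take what subtasks provide, pad the rest with the fallback
theorem fold_eq (fb : String) : ∀ (ag src acc : List String),
    (ag.foldl (fun (st : List String × List String) _ =>
        match st.1 with
        | [] => ([], st.2 ++ [fb])
        | t :: rest => (rest, st.2 ++ [t])) (src, acc)).2
      = acc ++ src.take ag.length ++ List.replicate (ag.length - src.length) fb := by
  intro ag
  induction ag with
  | nil => intro src acc; simp
  | cons a ag ih =>
    intro src acc
    cases src with
    | nil => simp [List.foldl_cons, ih, List.replicate_succ]
    | cons s src => simp [List.foldl_cons, ih]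

theorem main_eq (agents : List String) (subtasks : Option (List String)) (fallback_task : String) :
    prepare_subtasks agents subtasks fallback_task = prepare_subtasks_alt agents subtasks fallback_task := by
  unfold prepare_subtasks prepare_subtasks_alt
  rw [fold_eq]
  simp only [List.nil_append]
  by_cases hA : agents = []
  · simp [hA]
  · simp only [hA, if_false]
    set src := subtasks.getD [] with hsrc
    by_cases hS : src = []
    · rw [if_pos hS, hS]
      simp only [List.length_map, lt_irrefl, if_false, List.length_nil, List.take_nil,
        Nat.sub_zero, List.nil_append]
      exact List.map_const' (l := agents) (b := fallback_task)
    · rw [if_neg hS]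
      have hmap : src.map (fun task => task) = src := List.map_id' src
      rw [hmap]
      by_cases h1 : src.length < agents.length
      · rw [if_pos h1, List.take_of_length_le (by omega)]
      · by_cases h2 : src.length > agents.length
        · rw [if_neg h1, if_pos h2, PySem.List.slice_to_natCast]
          simp [Nat.sub_eq_zero_of_le (le_of_lt h2)]
        · rw [if_neg h1, if_neg h2]
          have : agents.length = src.length := by omega
          simp [this]

-- ===== VERDICT (by name: the statement is the Claim_ definition above) =====
theorem prepare_subtasks_spec : Claim_equal_prepare_subtasks := by
  intro agents subtasks fallback_task _
  exact main_eq agents subtasks fallback_task
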